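-- pv_equiv track=rewrite | github.com/Vish-devop/AlgoSprint-Python | Strings_Good_Qos/Palindrome_Or_Not.py | main_logic
-- ===== SOURCE A (Python) =====
-- def is_palindrome(s):
--     return s==s[::-1]
--
-- def main_logic(s):
--     i,j=0,len(s)
--     while j-i >2:
--         current_substring = s[i:j+1]
--         if is_palindrome(current_substring):
--             return True
--         i+=1
--         j-=1
-- ===== SOURCE B (Python) =====
-- def main_logic(s):
--     # The substrings A tests for k >= 1 are s[k:n-k+1]; being palindromic is
--     # antitone in size (a palindrome stays a palindrome after dropping its two
--     # end characters), so it suffices to test the whole string (k = 0 case)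
--     # and the innermost substring once: O(n) instead of O(n^2).
--     n = len(s)
--     if n > 2:
--         if s == s[::-1]:
--             return True
--         k = (n - 3) // 2
--         if k >= 1:
--             t = s[k:n - k + 1]
--             if t == t[::-1]:
--                 return True
-- ===== Notes on version B (the rewrite author's own statement) =====
-- stated objective: faster
-- what changed: Instead of scanning every nested substring quadratically, B uses that A's interior substrings shrink symmetrically, so palindromicity is antitone: it checks only the whole string and the single innermost substring, two O(n) palindrome tests.
import Mathlib
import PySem

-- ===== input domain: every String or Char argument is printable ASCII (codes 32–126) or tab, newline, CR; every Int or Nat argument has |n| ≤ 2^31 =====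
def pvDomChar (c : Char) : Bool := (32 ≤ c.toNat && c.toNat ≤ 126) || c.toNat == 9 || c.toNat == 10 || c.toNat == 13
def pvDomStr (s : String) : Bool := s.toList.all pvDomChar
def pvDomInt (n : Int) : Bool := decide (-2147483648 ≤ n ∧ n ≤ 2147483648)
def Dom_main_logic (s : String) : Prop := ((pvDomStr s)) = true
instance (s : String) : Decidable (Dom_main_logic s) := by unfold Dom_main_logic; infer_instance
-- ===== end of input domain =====

-- B replaces A's quadratic scan of all nested substrings by two linear palindrome
-- tests (the whole string and the innermost nested substring), using that A's
-- interior substrings shrink symmetrically at both ends.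

-- ===== PORT A =====
-- is_palindrome(s): s == s[::-1]; s[::-1] is reverse (PySem.List.slice?_none_none_neg_one)
def pvIsPal (l : List Char) : Bool := l == l.reverse

-- the while loop of main_logic, state (i, j)
def pvLoopA (cs : List Char) (i j : Int) : Option Bool :=
  if h : j - i > 2 then
    if pvIsPal (PySem.List.slice cs (some i) (some (j + 1))) then some true
    else pvLoopA cs (i + 1) (j - 1)
  else none
termination_by (j - i).toNat
decreasing_by omega

def main_logic (s : String) : Option Bool :=
  pvLoopA s.toList 0 (s.toList.length : Int)

-- ===== PORT B =====
def main_logic_alt (s : String) : Option Bool :=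
  let cs := s.toList
  let n : Int := cs.length
  if n > 2 then
    if cs == cs.reverse then some true
    else
      let k := PySem.Int.floordiv (n - 3) 2
      if 1 ≤ k then
        let t := PySem.List.slice cs (some k) (some (n - k + 1))
        if t == t.reverse then some true else none
      else none
  else none

-- ===== PRECONDITION & SPEC =====
def Spec_main_logic (s : String) (out : Option Bool) : Prop := out = main_logic_alt s
instance (s : String) (out : Option Bool) : Decidable (Spec_main_logic s out) := by unfold Spec_main_logic; infer_instance

-- ===== CLAIM (what is proved, stated in full; the proofs are below) =====
def Claim_equal_main_logic : Prop := ∀ (s : String), Dom_main_logic s → Spec_main_logic s (main_logic s)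

-- ===== LEMMAS AND PROOFS =====

-- the substring A tests at step k ≥ 1 (s[k : n-k+1]) in drop/take form
def pvSub (cs : List Char) (k : Nat) : List Char :=
  (cs.drop k).take (cs.length - 2 * k + 1)

-- the last k the while loop reaches
def pvKmax (cs : List Char) : Nat := (cs.length - 3) / 2

theorem pvTakeDropLast (l : List Char) (n : Nat) (h : n ≤ l.length) :
    (l.take n).dropLast = l.take (n - 1) := by
  rw [List.dropLast_eq_take, List.take_take, List.length_take]; congr 1; omega

theorem pvTakeTail (l : List Char) (n : Nat) :
    (l.take n).tail = l.tail.take (n - 1) := by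
  rcases l with _ | ⟨a, t⟩ <;> rcases n with _ | m <;> simp

-- a palindrome with both end characters removed is a palindrome
theorem pvPalShrink (l : List Char) (h : l.reverse = l) :
    (l.tail.dropLast).reverse = l.tail.dropLast := by
  have hr : ∀ m : List Char, m.dropLast.reverse = m.reverse.tail := by
    intro m
    have h2 := @List.dropLast_reverse _ m.reverse
    rw [List.reverse_reverse] at h2
    rw [h2, List.reverse_reverse]
  have h3 : l.tail.reverse = l.dropLast := by
    have := @List.dropLast_reverse _ l
    rw [h] at this; exact this.symm
  rw [hr, h3, List.tail_dropLast]

theorem pvSubShrink (cs : List Char) (k : Nat) (hk : 1 ≤ k) (hN : 2 * k + 3 ≤ cs.length) :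
    pvSub cs (k + 1) = (pvSub cs k).tail.dropLast := by
  unfold pvSub
  rw [pvTakeTail, List.tail_drop, pvTakeDropLast]
  · congr 1; omega
  · simp [List.length_drop]; omega

theorem pvSubMono (cs : List Char) :
    ∀ (d k : Nat), 1 ≤ k → 2 * (k + d) + 3 ≤ cs.length →
      (pvSub cs k).reverse = pvSub cs k → (pvSub cs (k + d)).reverse = pvSub cs (k + d) := by
  intro d
  induction d with
  | zero => intro k _ _ h; simpa using h
  | succ m ih =>
    intro k hk hN h
    have h1 : (pvSub cs (k + 1)).reverse = pvSub cs (k + 1) := by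
      rw [pvSubShrink cs k hk (by omega)]; exact pvPalShrink _ h
    have := ih (k + 1) (by omega) (by omega) h1
    simpa [Nat.add_assoc, Nat.add_comm, Nat.add_left_comm] using this

theorem pvLoopA_char (cs : List Char) :
    ∀ (d k : Nat), 1 ≤ k → pvKmax cs + 1 - k ≤ d →
      pvLoopA cs (k : Int) ((cs.length : Int) - k) =
        if (pvSub cs (pvKmax cs)).reverse = pvSub cs (pvKmax cs) ∧ k ≤ pvKmax cs
        then some true else none := by
  intro d
  induction d with
  | zero =>
    intro k hk hd
    rw [pvLoopA, dif_neg (by unfold pvKmax at hd; omega),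
      if_neg (by unfold pvKmax at hd ⊢; omega)]
  | succ m ih =>
    intro k hk hd
    by_cases hk' : k ≤ pvKmax cs
    · have hN : 2 * k + 3 ≤ cs.length := by unfold pvKmax at hk'; omega
      rw [pvLoopA, dif_pos (by omega)]
      have hs : PySem.List.slice cs (some (k : Int)) (some ((cs.length : Int) - k + 1)) =
          pvSub cs k := by
        rw [show ((cs.length : Int) - k + 1) = ((cs.length - k + 1 : Nat) : Int) from by omega,
          PySem.List.slice_natCast]
        unfold pvSub; congr 1; omega
      rw [hs]
      by_cases hp : pvIsPal (pvSub cs k)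
      · rw [if_pos hp]
        have hpal : (pvSub cs k).reverse = pvSub cs k := by
          unfold pvIsPal at hp; exact (beq_iff_eq.mp hp).symm
        have hmono := pvSubMono cs (pvKmax cs - k) k hk
          (by unfold pvKmax at hk' ⊢; omega) hpal
        rw [show k + (pvKmax cs - k) = pvKmax cs from by omega] at hmono
        rw [if_pos ⟨hmono, hk'⟩]
      · rw [if_neg hp]
        rw [show (k : Int) + 1 = ((k + 1 : Nat) : Int) from by push_cast; ring,
          show (cs.length : Int) - (k : Int) - 1 = (cs.length : Int) - ((k + 1 : Nat) : Int)
            from by push_cast; ring]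
        rw [ih (k + 1) (by omega) (by omega)]
        by_cases hq : (pvSub cs (pvKmax cs)).reverse = pvSub cs (pvKmax cs)
        · by_cases hke : k = pvKmax cs
          · exfalso; apply hp; subst hke; unfold pvIsPal; exact beq_iff_eq.mpr hq.symm
          · rw [if_pos ⟨hq, by omega⟩, if_pos ⟨hq, hk'⟩]
        · rw [if_neg (by tauto), if_neg (by tauto)]
    · rw [pvLoopA, dif_neg (by unfold pvKmax at hk'; omega),
        if_neg (by tauto)]

theorem main_logic_eq (s : String) : main_logic s = main_logic_alt s := by
  unfold main_logic main_logic_alt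
  show pvLoopA s.toList 0 (s.toList.length : Int) =
    (if ((s.toList.length : Int) > 2) then
      if s.toList == s.toList.reverse then some true
      else if (1 : Int) ≤ PySem.Int.floordiv ((s.toList.length : Int) - 3) 2 then
        (if PySem.List.slice s.toList
              (some (PySem.Int.floordiv ((s.toList.length : Int) - 3) 2))
              (some ((s.toList.length : Int) -
                PySem.Int.floordiv ((s.toList.length : Int) - 3) 2 + 1)) ==
            (PySem.List.slice s.toList
              (some (PySem.Int.floordiv ((s.toList.length : Int) - 3) 2))
              (some ((s.toList.length : Int) -
                PySem.Int.floordiv ((s.toList.length : Int) - 3) 2 + 1))).reverse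
         then some true else none)
      else none
    else none)
  set cs := s.toList with hcs
  by_cases hN : cs.length > 2
  · have hkB : PySem.Int.floordiv ((cs.length : Int) - 3) 2 = ((pvKmax cs : Nat) : Int) := by
      rw [show ((cs.length : Int) - 3) = ((cs.length - 3 : Nat) : Int) from by omega]
      exact_mod_cast PySem.Int.floordiv_natCast (cs.length - 3) 2
    rw [hkB, if_pos (by omega)]
    rw [pvLoopA, dif_pos (by omega)]
    have hs0 : PySem.List.slice cs (some 0) (some ((cs.length : Int) + 1)) = cs := by
      rw [PySem.List.slice_zero_start,
        show ((cs.length : Int) + 1) = ((cs.length + 1 : Nat) : Int) from by push_cast; ring,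
        PySem.List.slice_to_natCast]
      exact List.take_of_length_le (by omega)
    rw [hs0]
    by_cases hp : cs == cs.reverse
    · rw [if_pos (show pvIsPal cs = true from hp), if_pos hp]
    · rw [if_neg (show ¬ pvIsPal cs = true from hp), if_neg hp]
      rw [show (0 : Int) + 1 = ((1 : Nat) : Int) from by norm_num,
        show (cs.length : Int) - 1 = (cs.length : Int) - ((1 : Nat) : Int) from by norm_num]
      rw [pvLoopA_char cs (pvKmax cs + 1) 1 le_rfl (by omega)]
      by_cases hk1 : 1 ≤ pvKmax cs
      · rw [if_pos (show (1 : Int) ≤ ((pvKmax cs : Nat) : Int) from by exact_mod_cast hk1)]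
        have hKN : 2 * pvKmax cs + 3 ≤ cs.length := by unfold pvKmax at hk1 ⊢; omega
        have hsk : PySem.List.slice cs (some ((pvKmax cs : Nat) : Int))
            (some ((cs.length : Int) - ((pvKmax cs : Nat) : Int) + 1)) = pvSub cs (pvKmax cs) := by
          rw [show ((cs.length : Int) - ((pvKmax cs : Nat) : Int) + 1) =
              ((cs.length - pvKmax cs + 1 : Nat) : Int) from by omega,
            PySem.List.slice_natCast]
          unfold pvSub; congr 1; omega
        rw [hsk]
        by_cases hq : (pvSub cs (pvKmax cs)).reverse = pvSub cs (pvKmax cs)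
        · rw [if_pos ⟨hq, hk1⟩, if_pos (beq_iff_eq.mpr hq.symm)]
        · rw [if_neg (by tauto), if_neg (by rw [beq_iff_eq]; exact fun h => hq h.symm)]
      · rw [if_neg (fun h => hk1 h.2),
          if_neg (show ¬ (1 : Int) ≤ ((pvKmax cs : Nat) : Int) from by exact_mod_cast hk1)]
  · rw [pvLoopA, dif_neg (by omega), if_neg (by omega)]

-- ===== VERDICT (by name: the statement is the Claim_ definition above) =====
theorem main_logic_spec : Claim_equal_main_logic := by
  intro s _; exact main_logic_eq s
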